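-- pv_equiv track=rewrite | github.com/alexforencich/verilog-uart | tb/axis_ep.py | words2list
-- ===== SOURCE A (Python) =====
-- def words2list(f, N=1, WL=8):
--     frame = []
--     while len(f) > 0:
--         data = 0
--         keep = 0
--         for i in range(N):
--             data = data | (f.pop(0) << (i*WL))
--             keep = keep | (1 << i)
--             if len(f) == 0: break
--         frame.append((data, keep))
--     return frame
-- ===== SOURCE B (Python) =====
-- def words2list(f, N=1, WL=8):
--     frame = []
--     while f:
--         chunk = f[:N]
--         del f[:N]
--         data = 0
--         for i, w in enumerate(chunk):
--             data |= w << (i * WL)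
--         frame.append((data, (1 << len(chunk)) - 1))
--     return frame
-- ===== Notes on version B (the rewrite author's own statement) =====
-- stated objective: alternative
-- what changed: A builds data, keep and pops words one at a time inside a bounded inner loop with a break; B slices off a whole chunk per frame (del f[:N] keeps the in-place emptying of f), folds data over enumerate(chunk), and computes keep by the closed-form mask (1 << len(chunk)) - 1 instead of bit-by-bit accumulation.
import Mathlib
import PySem

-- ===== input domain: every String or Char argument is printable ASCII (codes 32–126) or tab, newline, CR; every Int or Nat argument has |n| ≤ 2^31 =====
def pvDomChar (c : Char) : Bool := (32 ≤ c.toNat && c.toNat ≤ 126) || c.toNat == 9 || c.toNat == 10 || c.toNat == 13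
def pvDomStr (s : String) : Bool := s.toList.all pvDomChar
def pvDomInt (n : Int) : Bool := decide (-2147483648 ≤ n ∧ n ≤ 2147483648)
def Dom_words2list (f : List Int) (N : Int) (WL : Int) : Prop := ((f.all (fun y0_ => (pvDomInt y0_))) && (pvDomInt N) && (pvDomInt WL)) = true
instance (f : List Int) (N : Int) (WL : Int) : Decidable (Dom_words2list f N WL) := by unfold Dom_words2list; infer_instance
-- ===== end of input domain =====

-- B replaces A's word-at-a-time pop/accumulate inner loop by slicing off a whole chunk per
-- frame and computing the keep mask in closed form (objective: alternative decomposition).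
-- Both A and B empty the list argument f in place (A by pop(0), B by del f[:N]); the
-- theorems below are about the return value.

-- ===== PORT A =====
-- pyShl a k = a << k, shifting in chunks of 2^31 so the Lean RUNTIME can evaluate
-- shift counts at or beyond its internal 2^32 limit (Python returns such values);
-- mathematically this is exactly a <<< k, used by both ports for `x << (i*WL)`.
def pyShl (a : Int) (k : Nat) : Int :=
  if k < 4294967296 then a <<< k
  else pyShl (a <<< (2147483648 : Nat)) (k - 2147483648)
termination_by k
decreasing_by omega

-- inner `for i in range(N)` loop of A: n = iterations left, i = the current loop index;
-- state (data, keep, f) as in the Python. The `n+1, []` branch (f.pop(0) on an empty list,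
-- an IndexError in Python) is unreachable under Pre_ (the loop is entered with f nonempty
-- and breaks as soon as f becomes empty); it returns the state unchanged for totality only.
-- Shifts: Python `x << k` is Lean `x <<< (k : Nat)`; `(i*WL).toNat` is exact for i*WL ≥ 0
-- (Python raises ValueError on a negative shift count — those inputs are outside Pre_).
def wordsInner (n : Nat) (i : Int) (f : List Int) (WL : Int) (data keep : Int) :
    Int × Int × List Int :=
  match n, f with
  | 0, _ => (data, keep, f)
  | _+1, [] => (data, keep, f)
  | n+1, w :: f' =>
    let data' := PySem.Int.bor data (pyShl w (i * WL).toNat)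
    let keep' := PySem.Int.bor keep ((1:Int) <<< i.toNat)
    if f'.length = 0 then (data', keep', f')
    else wordsInner n (i+1) f' WL data' keep'

-- outer `while len(f) > 0` loop of A, with fuel = the initial length of f (when N ≥ 1 each
-- pass removes at least one word, so this fuel suffices; for N ≤ 0 the Python loop never
-- terminates — those inputs are outside Pre_).
def wordsOuter (fuel : Nat) (f : List Int) (N WL : Int) : List (Int × Int) :=
  match fuel with
  | 0 => []
  | fuel+1 =>
    if f.length > 0 then
      let r := wordsInner N.toNat 0 f WL 0 0
      (r.1, r.2.1) :: wordsOuter fuel r.2.2 N WL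
    else []

def words2list (f : List Int) (N : Int) (WL : Int) : List (Int × Int) :=
  wordsOuter f.length f N WL

-- ===== PORT B =====
-- `while f:` loop of B, same fuel convention as A's outer loop; per iteration:
-- chunk = f[:N], the remaining f after `del f[:N]` is f[N:], data is a fold over
-- enumerate(chunk), keep = (1 << len(chunk)) - 1.
def altLoop (fuel : Nat) (f : List Int) (N WL : Int) : List (Int × Int) :=
  match fuel with
  | 0 => []
  | fuel+1 =>
    if f = [] then []
    else
      let chunk := PySem.List.slice f none (some N)
      let rest := PySem.List.slice f (some N) none
      let data := (PySem.List.enumerate chunk 0).foldl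
        (fun (d : Int) (iw : Int × Int) => PySem.Int.bor d (pyShl iw.2 (iw.1 * WL).toNat)) 0
      (data, ((1:Int) <<< chunk.length) - 1) :: altLoop fuel rest N WL

def words2list_alt (f : List Int) (N : Int) (WL : Int) : List (Int × Int) :=
  altLoop f.length f N WL

-- ===== PRECONDITION & SPEC =====
-- Pre_ excludes only inputs on which the Python A does NOT return: with f nonempty and
-- N ≤ 0 the while loop never terminates, and with N ≥ 2, WL < 0 and at least two words
-- in f the shift `f.pop(0) << (i*WL)` raises ValueError (negative shift count) at i = 1.
def Pre_words2list (f : List Int) (N : Int) (WL : Int) : Prop :=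
  f = [] ∨ (1 ≤ N ∧ (0 ≤ WL ∨ N = 1 ∨ f.length = 1))
instance (f : List Int) (N : Int) (WL : Int) : Decidable (Pre_words2list f N WL) := by
  unfold Pre_words2list; infer_instance

def pvWitness_words2list : List Int × Int × Int := ([1, 2, 3], 2, 8)

def Spec_words2list (f : List Int) (N : Int) (WL : Int) (out : List (Int × Int)) : Prop := out = words2list_alt f N WL
instance (f : List Int) (N : Int) (WL : Int) (out : List (Int × Int)) : Decidable (Spec_words2list f N WL out) := by unfold Spec_words2list; infer_instance

-- ===== CLAIM (what is proved, stated in full; the proofs are below) =====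
def Claim_equal_words2list : Prop := ∀ (f : List Int) (N : Int) (WL : Int), Dom_words2list f N WL → Pre_words2list f N WL → Spec_words2list f N WL (words2list f N WL)

-- ===== LEMMAS AND PROOFS =====

theorem mask_succ (i : Nat) :
    PySem.Int.bor (((1:Int) <<< i) - 1) ((1:Int) <<< i) = ((1:Int) <<< (i+1)) - 1 := by
  have h : ∀ k:Nat, ((1:Int) <<< k) = (((2:Nat)^k : Nat) : Int) := by
    intro k; simp [Int.shiftLeft_eq]
  have h2 : ∀ k:Nat, ((1:Int) <<< k) - 1 = (((2:Nat)^k - 1 : Nat) : Int) := by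
    intro k; rw [h]; have := Nat.one_le_two_pow (n := k); push_cast [this]; ring
  rw [h2 i, h2 (i+1), h i, PySem.Int.bor_natCast]
  congr 1
  apply Nat.eq_of_testBit_eq; intro j
  simp only [Nat.testBit_or, Nat.testBit_two_pow_sub_one, Nat.testBit_two_pow,
    Order.lt_add_one_iff]
  rw [Bool.eq_iff_iff]; simp; omega

-- A's inner loop, started at index i with keep = 2^i - 1, computes exactly B's chunk fold,
-- the closed-form mask, and leaves f.drop n.
theorem inner_spec (n : Nat) : ∀ (i : Nat) (f : List Int) (WL data : Int),
    wordsInner n (i:Int) f WL data (((1:Int) <<< i) - 1) =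
      ((PySem.List.enumerate (f.take n) (i:Int)).foldl
          (fun (d : Int) (iw : Int × Int) => PySem.Int.bor d (pyShl iw.2 (iw.1 * WL).toNat)) data,
        ((1:Int) <<< (i + min n f.length)) - 1,
        f.drop n) := by
  induction n with
  | zero => intro i f WL data; simp [wordsInner]
  | succ n ih =>
    intro i f WL data
    match f with
    | [] => simp [wordsInner]
    | w :: f' =>
      simp only [wordsInner, Int.toNat_natCast]
      by_cases hf : f'.length = 0
      · have : f' = [] := List.length_eq_zero_iff.mp hf
        subst this
        simp [PySem.List.enumerate_cons, PySem.List.enumerate, mask_succ]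
      · simp only [hf, if_false]
        have hcast : (i:Int) + 1 = ((i+1 : Nat) : Int) := by push_cast; ring
        rw [mask_succ, hcast, ih (i+1) f' WL _]
        have hm : i + 1 + min n f'.length = i + min (n+1) (f'.length+1) := by omega
        simp [List.take_succ_cons, List.drop_succ_cons,
          PySem.List.enumerate_cons, List.foldl_cons, List.length_cons, hm]

-- the two loops agree step by step once N ≥ 1 (both consume f[:N] and recurse on f[N:])
theorem outer_eq (fuel : Nat) : ∀ (f : List Int) (N WL : Int), 1 ≤ N →
    wordsOuter fuel f N WL = altLoop fuel f N WL := by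
  induction fuel with
  | zero => intro f N WL _; rfl
  | succ fuel ih =>
    intro f N WL hN
    by_cases hf : f = []
    · subst hf; simp [wordsOuter, altLoop]
    · have hlen : f.length > 0 := List.length_pos_iff.mpr hf
      have hN0 : (0:Int) ≤ N := by omega
      simp only [wordsOuter, altLoop, hf, hlen, if_pos, if_false]
      have hi := inner_spec N.toNat 0 f WL 0
      norm_num at hi
      rw [PySem.List.slice_to f hN0, PySem.List.slice_from f hN0, hi,
        ih (f.drop N.toNat) N WL hN]
      simp

-- ===== VERDICT (by name: the statement is the Claim_ definition above) =====
theorem words2list_spec : Claim_equal_words2list := by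
  intro f N WL _ hpre
  unfold Spec_words2list words2list words2list_alt
  rcases hpre with h | ⟨hN, _⟩
  · subst h; rfl
  · exact outer_eq f.length f N WL hN
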